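-- pv_equiv track=rewrite | github.com/braisgg10/Fundamentos-de-la-Programacion | labs/lab08/Ejs.py | cuantos_triangulares
-- ===== SOURCE A (Python) =====
-- def suma_intervalo(a:int, b:int) -> int:
--     suma = 0
--     for i in range (a,b+1):
--         suma+= i
--     return suma
--
-- def es_triangular (n:int) -> bool:
--     existe=False
--     k=0
--     while k <= n and not existe:
--         if suma_intervalo(1,k) == n:
--             existe = True
--         else:
--             k+=1
--     return existe
--
-- def cuantos_triangulares(n:int) -> int:
--     ct=0
--     for i in range(1,n+1):
--         if es_triangular(i) == True:
--             ct+=1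
--         else:
--             ct=ct
--     return ct
-- ===== SOURCE B (Python) =====
-- def cuantos_triangulares(n: int) -> int:
--     # Binary search for the largest k whose k-th triangular number is at most n;
--     # that k is the count of triangular numbers up to n.
--     if n < 1:
--         return 0
--     lo, hi = 0, n
--     while lo < hi:
--         mid = (lo + hi + 1) // 2
--         if mid * (mid + 1) // 2 <= n:
--             lo = mid
--         else:
--             hi = mid - 1
--     return lo
-- ===== Notes on version B (the rewrite author's own statement) =====
-- stated objective: faster
-- what changed: Replaces the triple-nested scan (for each i up to n, search k, sum the interval) by a single binary search for the largest k whose k-th triangular number is at most n, which equals the count of triangular numbers up to n.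
import Mathlib
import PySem

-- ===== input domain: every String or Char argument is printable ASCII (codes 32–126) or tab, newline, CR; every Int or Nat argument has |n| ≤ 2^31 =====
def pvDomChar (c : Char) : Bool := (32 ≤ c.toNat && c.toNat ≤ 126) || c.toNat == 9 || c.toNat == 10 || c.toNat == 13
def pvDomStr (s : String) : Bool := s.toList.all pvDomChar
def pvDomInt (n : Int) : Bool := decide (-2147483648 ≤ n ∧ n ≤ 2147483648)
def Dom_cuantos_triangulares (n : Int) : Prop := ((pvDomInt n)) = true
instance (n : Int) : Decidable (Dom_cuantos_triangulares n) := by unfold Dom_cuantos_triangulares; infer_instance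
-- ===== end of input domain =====

-- B replaces A's triple-nested scan by one binary search for the largest k whose
-- triangular number is at most n (objective: faster, asymptotically).

-- ===== PORT A =====
-- suma = 0; for i in range(a, b+1): suma += i
def suma_intervalo (a b : Int) : Int :=
  (PySem.List.pyRange a (b + 1) 1).foldl (fun suma i => suma + i) 0

-- while k <= n and not existe: ...  (existe is set and the loop exits, so the
-- loop body is transliterated as: hit → true, else continue with k+1; fuel is a
-- totality guard only — the loop runs at most (n+1) times)
def esTriLoop : Nat → Int → Int → Bool
  | 0, _, _ => false
  | fuel + 1, n, k =>
    if k ≤ n then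
      if suma_intervalo 1 k = n then true else esTriLoop fuel n (k + 1)
    else false

def es_triangular (n : Int) : Bool := esTriLoop (n + 1).toNat n 0

def cuantos_triangulares (n : Int) : Int :=
  (PySem.List.pyRange 1 (n + 1) 1).foldl
    (fun ct i => if es_triangular i = true then ct + 1 else ct) 0

-- ===== PORT B =====
-- fuel is a totality guard only: each step shrinks hi - lo, so (hi - lo).toNat steps suffice
def bsLoop : Nat → Int → Int → Int → Int
  | 0, _, lo, _ => lo
  | fuel + 1, n, lo, hi =>
    if lo < hi then
      let mid := PySem.Int.floordiv (lo + hi + 1) 2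
      if PySem.Int.floordiv (mid * (mid + 1)) 2 ≤ n then bsLoop fuel n mid hi
      else bsLoop fuel n lo (mid - 1)
    else lo

def cuantos_triangulares_alt (n : Int) : Int :=
  if n < 1 then 0 else bsLoop n.toNat n 0 n

-- ===== PRECONDITION & SPEC =====
def Spec_cuantos_triangulares (n : Int) (out : Int) : Prop := out = cuantos_triangulares_alt n
instance (n : Int) (out : Int) : Decidable (Spec_cuantos_triangulares n out) := by unfold Spec_cuantos_triangulares; infer_instance

-- ===== CLAIM (what is proved, stated in full; the proofs are below) =====
def Claim_equal_cuantos_triangulares : Prop := ∀ (n : Int), Dom_cuantos_triangulares n → Spec_cuantos_triangulares n (cuantos_triangulares n)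

-- ===== LEMMAS AND PROOFS =====

-- r is the number of (positive) triangular numbers ≤ n: the largest r with r(r+1)/2 ≤ n.
def goodP (n r : Int) : Prop := 0 ≤ r ∧ r * (r + 1) ≤ 2 * n ∧ 2 * n < (r + 1) * (r + 2)

lemma tri_mono_le {r s : Int} (hr : 0 ≤ r) (hrs : r ≤ s) : r * (r + 1) ≤ s * (s + 1) := by
  nlinarith

lemma goodP_uniq {n r s : Int} (h1 : goodP n r) (h2 : goodP n s) : r = s := by
  obtain ⟨hr0, hr1, hr2⟩ := h1
  obtain ⟨hs0, hs1, hs2⟩ := h2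
  rcases lt_trichotomy r s with h | h | h
  · have := tri_mono_le (by omega : (0:Int) ≤ r + 1) (by omega : r + 1 ≤ s)
    nlinarith
  · exact h
  · have := tri_mono_le (by omega : (0:Int) ≤ s + 1) (by omega : s + 1 ≤ r)
    nlinarith

lemma suma_nat (m : Nat) : 2 * suma_intervalo 1 (m : Int) = (m : Int) * ((m : Int) + 1) := by
  induction m with
  | zero =>
      simp [suma_intervalo, PySem.List.pyRange]
  | succ m ih =>
      have h : ((m : Int) + 1) + 1 = (((m + 1 : Nat) : Int)) + 1 := by push_cast; ring
      unfold suma_intervalo at *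
      rw [show (((m + 1 : Nat) : Int) + 1) = ((m : Int) + 1) + 1 by push_cast; ring,
          PySem.List.pyRange_one_succ_right (by omega : (1:Int) ≤ (m : Int) + 1),
          List.foldl_append]
      push_cast
      simp only [List.foldl]
      nlinarith [ih]

lemma suma_eq (k : Int) (hk : 0 ≤ k) : 2 * suma_intervalo 1 k = k * (k + 1) := by
  have : k = (k.toNat : Int) := by omega
  rw [this]; exact suma_nat k.toNat

lemma esTriLoop_iff_aux : ∀ (d : Nat) (n k : Int), (n - k + 1).toNat ≤ d →
    (esTriLoop d n k = true ↔ ∃ j : Int, k ≤ j ∧ j ≤ n ∧ suma_intervalo 1 j = n) := by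
  intro d
  induction d with
  | zero =>
      intro n k hd
      simp only [esTriLoop]
      constructor
      · intro h; exact absurd h (by simp)
      · rintro ⟨j, h1, h2, _⟩; omega
  | succ d ih =>
      intro n k hd
      simp only [esTriLoop]
      by_cases hk : k ≤ n
      · rw [if_pos hk]
        by_cases hs : suma_intervalo 1 k = n
        · rw [if_pos hs]
          exact ⟨fun _ => ⟨k, le_refl k, hk, hs⟩, fun _ => rfl⟩
        · rw [if_neg hs, ih n (k + 1) (by omega)]
          constructor
          · rintro ⟨j, h1, h2, h3⟩; exact ⟨j, by omega, h2, h3⟩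
          · rintro ⟨j, h1, h2, h3⟩
            refine ⟨j, ?_, h2, h3⟩
            rcases eq_or_lt_of_le h1 with h | h
            · exact absurd (h ▸ h3) hs
            · omega
      · rw [if_neg hk]
        constructor
        · intro h; exact absurd h (by simp)
        · rintro ⟨j, h1, h2, _⟩; omega

lemma esTriangular_iff (n : Int) :
    es_triangular n = true ↔ ∃ j : Int, 0 ≤ j ∧ j ≤ n ∧ suma_intervalo 1 j = n :=
  esTriLoop_iff_aux (n + 1).toNat n 0 (by omega)

lemma esTri_iff (i : Int) (hi : 1 ≤ i) :
    es_triangular i = true ↔ ∃ k : Int, 0 ≤ k ∧ k * (k + 1) = 2 * i := by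
  rw [esTriangular_iff]
  constructor
  · rintro ⟨j, h1, h2, h3⟩
    exact ⟨j, h1, by rw [← suma_eq j h1, h3]⟩
  · rintro ⟨k, h1, h2⟩
    have hki : k ≤ i := by
      by_contra h
      push Not at h
      have := tri_mono_le (by omega : (0:Int) ≤ i + 1) (by omega : i + 1 ≤ k)
      nlinarith
    refine ⟨k, h1, hki, ?_⟩
    have := suma_eq k h1
    omega

lemma cuantos_zero : cuantos_triangulares 0 = 0 := by
  simp [cuantos_triangulares, PySem.List.pyRange]

lemma cuantos_succ (m : Nat) :
    cuantos_triangulares ((m : Int) + 1) =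
      cuantos_triangulares (m : Int) +
        (if es_triangular ((m : Int) + 1) = true then 1 else 0) := by
  unfold cuantos_triangulares
  rw [PySem.List.pyRange_one_succ_right (by omega : (1:Int) ≤ (m : Int) + 1),
      List.foldl_append]
  simp only [List.foldl]
  split_ifs <;> omega

lemma goodP_A (m : Nat) : goodP (m : Int) (cuantos_triangulares (m : Int)) := by
  induction m with
  | zero =>
      simp only [Nat.cast_zero, cuantos_zero]
      refine ⟨le_refl 0, by norm_num, by norm_num⟩
  | succ m ih =>
      push_cast
      rw [cuantos_succ m]
      set r := cuantos_triangulares (m : Int) with hr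
      obtain ⟨h0, h1, h2⟩ := ih
      by_cases h : es_triangular ((m : Int) + 1) = true
      · rw [if_pos h]
        obtain ⟨k, hk0, hk⟩ := (esTri_iff ((m : Int) + 1) (by omega)).mp h
        have hkr : k = r + 1 := by
          have hgt : r < k := by
            by_contra hc
            push Not at hc
            have := tri_mono_le hk0 hc
            nlinarith
          have hlt : k < r + 2 := by
            by_contra hc
            push Not at hc
            have := tri_mono_le (by omega : (0:Int) ≤ r + 2) hc
            nlinarith
          omega
        subst hkr
        exact ⟨by omega, by nlinarith, by nlinarith⟩
      · rw [if_neg h]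
        simp only [add_zero]
        refine ⟨h0, by nlinarith, ?_⟩
        have hne : (r + 1) * ((r + 1) + 1) ≠ 2 * ((m : Int) + 1) := by
          intro he
          exact h ((esTri_iff ((m : Int) + 1) (by omega)).mpr ⟨r + 1, by omega, he⟩)
        obtain ⟨t, ht⟩ := Int.even_mul_succ_self (r + 1)
        have hring : (r + 1) * (r + 2) = t + t := by
          rw [show (r + 1) * (r + 2) = (r + 1) * ((r + 1) + 1) from by ring]; exact ht
        have ha : 2 * (m : Int) < t + t := by
          rw [← hring]; exact h2
        have hb : t + t ≠ 2 * ((m : Int) + 1) := by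
          rw [← ht]; exact hne
        rw [hring]
        omega

lemma bsLoop_correct : ∀ (d : Nat) (n lo hi : Int), (hi - lo).toNat ≤ d →
    0 ≤ lo → lo ≤ hi → lo * (lo + 1) ≤ 2 * n →
    (∀ k : Int, 0 ≤ k → k * (k + 1) ≤ 2 * n → k ≤ hi) →
    goodP n (bsLoop d n lo hi) := by
  intro d
  induction d with
  | zero =>
      intro n lo hi hd h0 hlh hlo hhi
      simp only [bsLoop]
      refine ⟨h0, hlo, ?_⟩
      by_contra hc
      push Not at hc
      have := hhi (lo + 1) (by omega) (by nlinarith)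
      omega
  | succ d ih =>
      intro n lo hi hd h0 hlh hlo hhi
      simp only [bsLoop]
      by_cases hlt : lo < hi
      · rw [if_pos hlt]
        have hmid : PySem.Int.floordiv (lo + hi + 1) 2 = (lo + hi + 1) / 2 :=
          PySem.Int.floordiv_eq_ediv_of_pos (by omega)
        set mid := PySem.Int.floordiv (lo + hi + 1) 2 with hm
        have hmlo : lo < mid := by omega
        have hmhi : mid ≤ hi := by omega
        obtain ⟨t, ht⟩ := Int.even_mul_succ_self mid
        have ht' : mid * (mid + 1) = t + t := by omega
        have hcond : PySem.Int.floordiv (mid * (mid + 1)) 2 = t := by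
          rw [PySem.Int.floordiv_eq_ediv_of_pos (by omega)]
          omega
        by_cases hc : PySem.Int.floordiv (mid * (mid + 1)) 2 ≤ n
        · rw [if_pos hc]
          rw [hcond] at hc
          exact ih n mid hi (by omega) (by omega) hmhi (by omega) hhi
        · rw [if_neg hc]
          rw [hcond] at hc
          push Not at hc
          refine ih n lo (mid - 1) (by omega) h0 ?_ hlo ?_
          · by_contra hcc
            push Not at hcc
            have : mid ≤ lo := by omega
            omega
          · intro k hk0 hk
            by_contra hkk
            push Not at hkk
            have := tri_mono_le (by omega : (0:Int) ≤ mid) (by omega : mid ≤ k)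
            omega
      · rw [if_neg hlt]
        have heq : lo = hi := by omega
        refine ⟨h0, hlo, ?_⟩
        by_contra hc
        push Not at hc
        have := hhi (lo + 1) (by omega) (by nlinarith)
        omega

lemma goodP_B (n : Int) (hn : 1 ≤ n) : goodP n (cuantos_triangulares_alt n) := by
  unfold cuantos_triangulares_alt
  rw [if_neg (by omega : ¬ n < 1)]
  refine bsLoop_correct n.toNat n 0 n (by omega) (by omega) (by omega) (by omega) ?_
  intro k hk0 hk
  by_contra hc
  push Not at hc
  have := tri_mono_le (by omega : (0:Int) ≤ n + 1) (by omega : n + 1 ≤ k)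
  nlinarith

lemma cuantos_nonpos (n : Int) (hn : n ≤ 0) : cuantos_triangulares n = 0 := by
  unfold cuantos_triangulares
  have : PySem.List.pyRange 1 (n + 1) 1 = [] := by
    simp [PySem.List.pyRange]
    omega
  rw [this]
  rfl

-- ===== VERDICT (by name: the statement is the Claim_ definition above) =====
theorem cuantos_triangulares_spec : Claim_equal_cuantos_triangulares := by
  intro n _hdom
  unfold Spec_cuantos_triangulares
  by_cases hn : n < 1
  · rw [cuantos_nonpos n (by omega)]
    unfold cuantos_triangulares_alt
    rw [if_pos hn]
  · push Not at hn
    have hA : goodP n (cuantos_triangulares n) := by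
      have : n = (n.toNat : Int) := by omega
      rw [this]
      exact goodP_A n.toNat
    exact goodP_uniq hA (goodP_B n hn)
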